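-- pv_equiv track=rewrite | github.com/AmineKheldouni/Google-Hash-Code-2017 | X_file.py | valid_slices
-- ===== SOURCE A (Python) =====
-- def valid_slices(l, h):
--     list_valid_slices = []
--     for i in range(1, h+1):
--         for j in range(i, h+1):
--             if 2*l <= i*j and i*j <= h:
--                 list_valid_slices.append((i, j))
--                 if i != j:
--                     list_valid_slices.append((j ,i))
--     return sorted(list_valid_slices, key=lambda x : x[0]*x[1], reverse = True)
-- ===== SOURCE B (Python) =====
-- def valid_slices(l, h):
--     lo = max(1, 2 * l)
--     res = []
--     a = h
--     while a >= lo: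
--         d = 1
--         while d * d <= a:
--             if a % d == 0:
--                 q = a // d
--                 res.append((d, q))
--                 if d != q:
--                     res.append((q, d))
--             d += 1
--         a -= 1
--     return res
-- ===== Notes on version B (the rewrite author's own statement) =====
-- stated objective: faster
-- what changed: B replaces A's full (i,j) double loop over [1,h]^2 plus a stable sort with a direct enumeration: areas descending from h to max(1,2*l), divisor pairs per area found by trial division up to sqrt(a), producing the result already in A's order with no sort.
import Mathlib
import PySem

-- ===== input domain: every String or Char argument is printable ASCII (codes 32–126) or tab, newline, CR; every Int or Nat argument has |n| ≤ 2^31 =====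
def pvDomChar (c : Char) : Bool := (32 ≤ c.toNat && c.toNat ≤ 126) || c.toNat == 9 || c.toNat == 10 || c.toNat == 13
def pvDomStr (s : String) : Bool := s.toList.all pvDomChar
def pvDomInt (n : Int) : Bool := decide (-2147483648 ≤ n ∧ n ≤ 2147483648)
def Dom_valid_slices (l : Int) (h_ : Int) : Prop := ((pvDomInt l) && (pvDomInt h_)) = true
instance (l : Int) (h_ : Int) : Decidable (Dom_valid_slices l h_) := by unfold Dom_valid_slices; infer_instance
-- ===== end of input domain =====

-- B replaces A's full (i,j) double loop followed by a stable sort with a direct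
-- enumeration: areas descending from h_ down to max(1, 2*l), divisor pairs per area,
-- so the result comes out already in A's order and no sort is needed.

-- ===== PORT A =====
def valid_slices (l : Int) (h_ : Int) : List (Int × Int) :=
  let lst :=
    (PySem.List.pyRange 1 (h_ + 1)).foldl (fun acc i =>
      (PySem.List.pyRange i (h_ + 1)).foldl (fun acc2 j =>
        if 2 * l ≤ i * j ∧ i * j ≤ h_ then
          let acc3 := acc2 ++ [(i, j)]
          if i ≠ j then acc3 ++ [(j, i)] else acc3
        else acc2) acc) []
  PySem.List.sorted lst (fun x => x.1 * x.2) true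

-- ===== PORT B =====
-- inner `while d*d <= a` loop of Source B, appending onto res
def vsDLoop (a : Int) (d : Int) (res : List (Int × Int)) : List (Int × Int) :=
  if _hdd : d * d ≤ a then
    vsDLoop a (d + 1)
      (if PySem.Int.mod a d = 0 then
        let q := PySem.Int.floordiv a d
        (res ++ [(d, q)]) ++ (if d ≠ q then [(q, d)] else [])
       else res)
  else res
termination_by (a + 1 - d).toNat
decreasing_by
  by_cases hd : d ≤ 0
  · have : (0:Int) ≤ d * d := mul_self_nonneg d
    omega
  · have : d ≤ d * d := le_mul_of_one_le_left (by omega) (by omega)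
    omega

-- outer `while a >= lo` loop of Source B
def vsALoop (lo : Int) (a : Int) (res : List (Int × Int)) : List (Int × Int) :=
  if hla : a ≥ lo then vsALoop lo (a - 1) (vsDLoop a 1 res) else res
termination_by (a + 1 - lo).toNat

def valid_slices_alt (l : Int) (h_ : Int) : List (Int × Int) :=
  vsALoop (max 1 (2 * l)) h_ []

-- ===== PRECONDITION & SPEC =====
def Spec_valid_slices (l : Int) (h_ : Int) (out : List (Int × Int)) : Prop := out = valid_slices_alt l h_
instance (l : Int) (h_ : Int) (out : List (Int × Int)) : Decidable (Spec_valid_slices l h_ out) := by unfold Spec_valid_slices; infer_instance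

-- ===== CLAIM (what is proved, stated in full; the proofs are below) =====
def Claim_equal_valid_slices : Prop := ∀ (l : Int) (h_ : Int), Dom_valid_slices l h_ → Spec_valid_slices l h_ (valid_slices l h_)

-- ===== LEMMAS AND PROOFS =====

-- key of a pair
def vsKey (x : Int × Int) : Int := x.1 * x.2

-- A's per-(i,j) chunk, and the pre-sort list of A as a flatMap
def vsChunkA (l h_ i j : Int) : List (Int × Int) :=
  if 2 * l ≤ i * j ∧ i * j ≤ h_ then (i, j) :: (if i ≠ j then [(j, i)] else []) else []

def vsL (l h_ : Int) : List (Int × Int) :=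
  (PySem.List.pyRange 1 (h_ + 1)).flatMap (fun i =>
    (PySem.List.pyRange i (h_ + 1)).flatMap (fun j => vsChunkA l h_ i j))

-- grouping of a list by descending areas
def vsG (as : List Int) (P : List (Int × Int)) : List (Int × Int) :=
  as.flatMap (fun a => P.filter (fun x => vsKey x == a))

-- divisor chunk of B at divisor i of area a
def vsChunkB (a i : Int) : List (Int × Int) :=
  if i ∣ a ∧ i * i ≤ a then (i, a / i) :: (if i ≠ a / i then [(a / i, i)] else []) else []

theorem vsL_eq (l h_ : Int) :
    ((PySem.List.pyRange 1 (h_ + 1)).foldl (fun acc i =>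
      (PySem.List.pyRange i (h_ + 1)).foldl (fun acc2 j =>
        if 2 * l ≤ i * j ∧ i * j ≤ h_ then
          let acc3 := acc2 ++ [(i, j)]
          if i ≠ j then acc3 ++ [(j, i)] else acc3
        else acc2) acc) []) = vsL l h_ := by
  have hinner : ∀ (i : Int) (acc : List (Int × Int)),
      ((PySem.List.pyRange i (h_ + 1)).foldl (fun acc2 j =>
        if 2 * l ≤ i * j ∧ i * j ≤ h_ then
          let acc3 := acc2 ++ [(i, j)]
          if i ≠ j then acc3 ++ [(j, i)] else acc3
        else acc2) acc)
        = acc ++ (PySem.List.pyRange i (h_ + 1)).flatMap (fun j => vsChunkA l h_ i j) := by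
    intro i acc
    rw [show (fun (acc2 : List (Int × Int)) (j : Int) =>
          if 2 * l ≤ i * j ∧ i * j ≤ h_ then
            let acc3 := acc2 ++ [(i, j)]
            if i ≠ j then acc3 ++ [(j, i)] else acc3
          else acc2)
        = (fun (acc2 : List (Int × Int)) (j : Int) => acc2 ++ vsChunkA l h_ i j) from by
      funext acc2 j
      unfold vsChunkA
      split_ifs <;> simp]
    exact PySem.List.foldl_append_eq_flatMap _ _ _
  rw [show (fun (acc : List (Int × Int)) (i : Int) =>
        (PySem.List.pyRange i (h_ + 1)).foldl (fun acc2 j =>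
          if 2 * l ≤ i * j ∧ i * j ≤ h_ then
            let acc3 := acc2 ++ [(i, j)]
            if i ≠ j then acc3 ++ [(j, i)] else acc3
          else acc2) acc)
      = (fun (acc : List (Int × Int)) (i : Int) =>
          acc ++ (PySem.List.pyRange i (h_ + 1)).flatMap (fun j => vsChunkA l h_ i j)) from by
    funext acc i; exact hinner i acc]
  rw [PySem.List.foldl_append_eq_flatMap]
  simp [vsL]

theorem insertBy_split {α : Type} (bef : α → α → Bool) (x : α) (A B : List α)
    (hA : ∀ y ∈ A, bef x y = false) (hB : ∀ y ∈ B, bef x y = true) :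
    PySem.List.insertBy bef x (A ++ B) = A ++ x :: B := by
  induction A with
  | nil =>
      cases B with
      | nil => simp [PySem.List.insertBy]
      | cons b bs => simp [PySem.List.insertBy, hB b (by simp)]
  | cons a as ih =>
      have ha := hA a (by simp)
      simp [PySem.List.insertBy, ha]
      exact ih (fun y hy => hA y (by simp [hy]))

theorem vsG_append (as1 as2 : List Int) (P : List (Int × Int)) :
    vsG (as1 ++ as2) P = vsG as1 P ++ vsG as2 P := by
  simp [vsG]

theorem vsG_cons (a : Int) (as : List Int) (P : List (Int × Int)) :
    vsG (a :: as) P = P.filter (fun x => vsKey x == a) ++ vsG as P := by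
  simp [vsG]

theorem key_of_mem_vsG (as : List Int) (P : List (Int × Int)) (y : Int × Int)
    (h : y ∈ vsG as P) : vsKey y ∈ as := by
  unfold vsG at h
  rcases List.mem_flatMap.mp h with ⟨a, ha, hy⟩
  rcases List.mem_filter.mp hy with ⟨-, hk⟩
  exact (beq_iff_eq.mp hk) ▸ ha

theorem vsG_snoc_ne (as : List Int) (P : List (Int × Int)) (x : Int × Int)
    (h : ∀ a ∈ as, a ≠ vsKey x) : vsG as (P ++ [x]) = vsG as P := by
  unfold vsG
  apply List.flatMap_congr
  intro a ha
  have : (vsKey x == a) = false := by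
    exact beq_eq_false_iff_ne.mpr (fun e => (h a ha) e.symm)
  simp [List.filter_append, this]

theorem insert_into_G (as : List Int) (P : List (Int × Int)) (x : Int × Int)
    (hdesc : as.Pairwise (· > ·)) (hx : vsKey x ∈ as) :
    PySem.List.insertBy (fun a b => decide (vsKey b < vsKey a)) x (vsG as P)
      = vsG as (P ++ [x]) := by
  obtain ⟨as1, as2, rfl⟩ := List.append_of_mem hx
  rw [List.pairwise_append] at hdesc
  obtain ⟨hp1, hp2, hcross⟩ := hdesc
  have h1 : ∀ b ∈ as1, b > vsKey x := fun b hb => hcross b hb (vsKey x) (by simp)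
  have h2 : ∀ b ∈ as2, vsKey x > b := fun b hb => (List.pairwise_cons.mp hp2).1 b hb
  rw [vsG_append, vsG_cons, ← List.append_assoc]
  rw [insertBy_split _ x (vsG as1 P ++ P.filter (fun y => vsKey y == vsKey x)) (vsG as2 P)
      (by
        intro y hy
        rcases List.mem_append.mp hy with hy1 | hy2
        · have := h1 _ (key_of_mem_vsG _ _ _ hy1)
          simp
          omega
        · have := beq_iff_eq.mp (List.mem_filter.mp hy2).2
          simp
          omega)
      (by
        intro y hy
        have := h2 _ (key_of_mem_vsG _ _ _ hy)
        simp
        omega)]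
  rw [vsG_append, vsG_cons]
  rw [vsG_snoc_ne as1 P x (fun a ha => ne_of_gt (h1 a ha)),
      vsG_snoc_ne as2 P x (fun a ha => ne_of_lt (h2 a ha))]
  simp [List.filter_append]

theorem foldl_insert_G (as : List Int) (M P : List (Int × Int))
    (hdesc : as.Pairwise (· > ·)) (hM : ∀ x ∈ M, vsKey x ∈ as) :
    M.foldl (fun acc x => PySem.List.insertBy (fun a b => decide (vsKey b < vsKey a)) x acc) (vsG as P)
      = vsG as (P ++ M) := by
  induction M generalizing P with
  | nil => simp
  | cons m ms ih =>
      simp only [List.foldl_cons]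
      rw [insert_into_G as P m hdesc (hM m (by simp)),
          ih (P ++ [m]) (fun x hx => hM x (by simp [hx]))]
      simp

theorem sorted_rev_eq_G (as : List Int) (M : List (Int × Int))
    (hdesc : as.Pairwise (· > ·)) (hM : ∀ x ∈ M, vsKey x ∈ as) :
    PySem.List.sorted M vsKey true = vsG as M := by
  rw [PySem.List.sorted_rev_eq_foldl_insertBy]
  have h0 : vsG as [] = [] := by
    unfold vsG
    exact List.flatMap_eq_nil_iff.mpr (by simp)
  have := foldl_insert_G as M [] hdesc hM
  rw [h0] at this
  simpa [vsG] using this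

theorem vsL_key_mem (l h_ : Int) (x : Int × Int) (hx : x ∈ vsL l h_) :
    max 1 (2 * l) ≤ vsKey x ∧ vsKey x ≤ h_ := by
  unfold vsL at hx
  rcases List.mem_flatMap.mp hx with ⟨i, hi, hx2⟩
  rcases List.mem_flatMap.mp hx2 with ⟨j, hj, hx3⟩
  rw [PySem.List.mem_pyRange_one] at hi hj
  have hk : vsKey x = i * j ∧ 2 * l ≤ i * j ∧ i * j ≤ h_ := by
    unfold vsChunkA at hx3
    split_ifs at hx3 with hc hne
    · rcases List.mem_cons.mp hx3 with rfl | hx4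
      · exact ⟨by simp [vsKey], hc⟩
      · rcases List.mem_singleton.mp hx4 with rfl
        exact ⟨by simp [vsKey, mul_comm], hc⟩
    · rcases List.mem_singleton.mp hx3 with rfl
      exact ⟨by simp [vsKey], hc⟩
    · simp at hx3
  have hij : 1 ≤ i * j := by nlinarith [hi.1, hj.1]
  rw [hk.1]
  exact ⟨max_le_iff.mpr ⟨hij, hk.2.1⟩, hk.2.2⟩

-- unique-hit flatMap collapse
theorem flatMap_single {β : Type} (xs : List Int) (f : Int → List β) (j0 : Int)
    (hnd : xs.Nodup) (hz : ∀ j ∈ xs, j ≠ j0 → f j = []) :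
    xs.flatMap f = if j0 ∈ xs then f j0 else [] := by
  induction xs with
  | nil => simp
  | cons a as ih =>
      simp only [List.flatMap_cons]
      rcases List.nodup_cons.mp hnd with ⟨hna, hnd'⟩
      by_cases ha : a = j0
      · subst ha
        rw [List.flatMap_eq_nil_iff.mpr (fun j hj => hz j (by simp [hj]) (fun e => hna (e ▸ hj)))]
        simp
      · rw [hz a (by simp) ha, ih hnd' (fun j hj hne => hz j (by simp [hj]) hne)]
        have hne2 : j0 ≠ a := fun e => ha e.symm
        simp [hne2]

theorem filter_vsL (l h_ a : Int) (ha1 : max 1 (2 * l) ≤ a) (ha2 : a ≤ h_) :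
    (vsL l h_).filter (fun x => vsKey x == a)
      = (PySem.List.pyRange 1 (h_ + 1)).flatMap (fun i => vsChunkB a i) := by
  have ha0 : 1 ≤ a ∧ 2 * l ≤ a := max_le_iff.mp ha1
  unfold vsL
  rw [List.filter_flatMap]
  apply List.flatMap_congr
  intro i hi
  rw [PySem.List.mem_pyRange_one] at hi
  rw [List.filter_flatMap]
  have hfj : ∀ j : Int, (vsChunkA l h_ i j).filter (fun x => vsKey x == a)
      = if i * j = a then vsChunkA l h_ i j else [] := by
    intro j
    unfold vsChunkA
    by_cases hja : i * j = a
    · split_ifs with hc hne <;>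
        simp [vsKey, hja, show j * i = a from by rw [mul_comm]; exact hja]
    · split_ifs with hc hne <;>
        simp [vsKey, hja, (by rw [mul_comm]; exact hja : j * i ≠ a)]
  by_cases hdvd : i ∣ a
  · have hi0 : i ≠ 0 := by omega
    have hj0a : i * (a / i) = a := Int.mul_ediv_cancel' hdvd
    rw [flatMap_single _ _ (a / i) (PySem.List.nodup_pyRange_one _ _)
        (by
          intro j hj hne
          rw [hfj j, if_neg]
          intro hja
          exact hne (by rw [← hja, Int.mul_ediv_cancel_left j hi0]))]
    have hle : a / i ≤ a := Int.ediv_le_self i (by omega)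
    by_cases hsq : i * i ≤ a
    · have hmem : a / i ∈ PySem.List.pyRange i (h_ + 1) := by
        rw [PySem.List.mem_pyRange_one]
        exact ⟨(Int.le_ediv_iff_mul_le (by omega)).mpr hsq, by omega⟩
      rw [if_pos hmem, hfj _, if_pos hj0a]
      unfold vsChunkA vsChunkB
      rw [if_pos (show 2 * l ≤ i * (a / i) ∧ i * (a / i) ≤ h_ from
            ⟨by rw [hj0a]; omega, by rw [hj0a]; omega⟩),
          if_pos (show i ∣ a ∧ i * i ≤ a from ⟨hdvd, hsq⟩)]
    · have hmem : a / i ∉ PySem.List.pyRange i (h_ + 1) := by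
        rw [PySem.List.mem_pyRange_one]
        intro hm
        exact hsq ((Int.le_ediv_iff_mul_le (by omega)).mp hm.1)
      rw [if_neg hmem]
      unfold vsChunkB
      rw [if_neg (by tauto)]
  · rw [List.flatMap_eq_nil_iff.mpr
        (fun j hj => by
          rw [hfj j, if_neg]
          intro hja
          exact hdvd ⟨j, hja.symm⟩)]
    unfold vsChunkB
    rw [if_neg (by tauto)]

theorem vsDLoop_eq (a d : Int) (res : List (Int × Int)) (hd : 1 ≤ d) (ha : 1 ≤ a) :
    vsDLoop a d res = res ++ (PySem.List.pyRange d (a + 1)).flatMap (fun i => vsChunkB a i) := by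
  rw [vsDLoop]
  by_cases hdd : d * d ≤ a
  · rw [dif_pos hdd]
    have hda : d ≤ a := le_trans (le_mul_of_one_le_left (by omega) hd) hdd
    rw [vsDLoop_eq a (d + 1) _ (by omega) ha]
    rw [PySem.List.pyRange_one_cons (show d < a + 1 by omega)]
    rw [List.flatMap_cons]
    have hres : (if PySem.Int.mod a d = 0 then
          (res ++ [(d, PySem.Int.floordiv a d)]) ++
            (if d ≠ PySem.Int.floordiv a d then [(PySem.Int.floordiv a d, d)] else [])
        else res) = res ++ vsChunkB a d := by
      have hmod : PySem.Int.mod a d = 0 ↔ d ∣ a := by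
        rw [PySem.Int.mod, Int.fmod_eq_emod]
        simp [show (0:Int) ≤ d by omega]
      have hdiv : PySem.Int.floordiv a d = a / d := by
        rw [PySem.Int.floordiv, Int.fdiv_eq_ediv]
        simp [show (0:Int) ≤ d by omega]
      unfold vsChunkB
      rw [hdiv]
      by_cases hdv : d ∣ a
      · rw [if_pos (hmod.mpr hdv), if_pos (show d ∣ a ∧ d * d ≤ a from ⟨hdv, hdd⟩)]
        by_cases hq : d = a / d
        · simp [← hq]
        · simp [hq]
      · rw [if_neg (fun e => hdv (hmod.mp e)), if_neg (by tauto)]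
        simp
    rw [hres]
    simp
  · rw [dif_neg hdd]
    rw [List.flatMap_eq_nil_iff.mpr
        (fun i hi => by
          rcases PySem.List.mem_pyRange_one.mp hi with ⟨h1, h2⟩
          unfold vsChunkB
          rw [if_neg]
          rintro ⟨-, hsq⟩
          have : d * d ≤ i * i := mul_le_mul h1 h1 (by omega) (by omega)
          omega)]
    simp
termination_by (a + 1 - d).toNat

theorem range_ext (a h_ : Int) (ha1 : 1 ≤ a) (ha2 : a ≤ h_) :
    (PySem.List.pyRange 1 (h_ + 1)).flatMap (fun i => vsChunkB a i)
      = (PySem.List.pyRange 1 (a + 1)).flatMap (fun i => vsChunkB a i) := by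
  rw [PySem.List.pyRange_one_append 1 (a + 1) (h_ + 1) (by omega) (by omega)]
  rw [List.flatMap_append]
  have hnil : (PySem.List.pyRange (a + 1) (h_ + 1)).flatMap (fun i => vsChunkB a i) = [] := by
    apply List.flatMap_eq_nil_iff.mpr
    intro i hi
    rcases PySem.List.mem_pyRange_one.mp hi with ⟨h1, h2⟩
    unfold vsChunkB
    rw [if_neg]
    rintro ⟨-, hsq⟩
    have : i ≤ i * i := le_mul_of_one_le_left (by omega) (by omega)
    omega
  rw [hnil]
  simp

theorem vsALoop_eq (lo a : Int) (res : List (Int × Int)) (hlo : 1 ≤ lo) :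
    vsALoop lo a res
      = res ++ ((PySem.List.pyRange lo (a + 1)).reverse).flatMap
          (fun a' => (PySem.List.pyRange 1 (a' + 1)).flatMap (fun i => vsChunkB a' i)) := by
  rw [vsALoop]
  by_cases hla : a ≥ lo
  · rw [dif_pos hla]
    rw [vsALoop_eq lo (a - 1) _ hlo]
    rw [vsDLoop_eq a 1 res le_rfl (by omega)]
    rw [show a - 1 + 1 = a by omega]
    rw [PySem.List.pyRange_one_succ_right (show lo ≤ a from hla)]
    rw [List.reverse_append]
    simp
  · rw [dif_neg hla]
    rw [show PySem.List.pyRange lo (a + 1) = [] by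
      rw [PySem.List.pyRange_one]
      rw [show (a + 1 - lo).toNat = 0 by omega]
      simp]
    simp
termination_by (a + 1 - lo).toNat

-- ===== VERDICT (by name: the statement is the Claim_ definition above) =====
theorem valid_slices_spec : Claim_equal_valid_slices := by
  intro l h_ _
  unfold Spec_valid_slices valid_slices valid_slices_alt
  rw [vsL_eq]
  show PySem.List.sorted (vsL l h_) vsKey true = vsALoop (max 1 (2 * l)) h_ []
  set lo := max 1 (2 * l) with hlo
  have hlo1 : 1 ≤ lo := le_max_left _ _
  rw [sorted_rev_eq_G ((PySem.List.pyRange lo (h_ + 1)).reverse) (vsL l h_)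
      (by rw [List.pairwise_reverse]; exact PySem.List.pairwise_lt_pyRange_one lo (h_ + 1))
      (by intro x hx
          rcases vsL_key_mem l h_ x hx with ⟨h1, h2⟩
          simp only [List.mem_reverse, PySem.List.mem_pyRange_one]
          omega)]
  rw [vsALoop_eq lo h_ [] hlo1]
  unfold vsG
  simp only [List.nil_append]
  apply List.flatMap_congr
  intro a hamem
  have hab : lo ≤ a ∧ a < h_ + 1 := PySem.List.mem_pyRange_one.mp (List.mem_reverse.mp hamem)
  rw [filter_vsL l h_ a hab.1 (by omega)]
  exact range_ext a h_ (by omega) (by omega)
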